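-- pv_equiv track=rewrite | github.com/Blackflagdivecenter/Thalos | scripts/extract_naui_minimums.py | extract_policies_section
-- ===== SOURCE A (Python) =====
-- def extract_policies_section(text):
--     """Extract the POLICIES section from a course page."""
--     # Try to find POLICIES block
--     lines = text.split('\n')
--     result_lines = []
--     in_policies = False
--     in_practical = False
--
--     for i, line in enumerate(lines):
--         line_stripped = line.strip()
--
--         # Start capturing at POLICIES or PRACTICAL APPLICATION
--         if 'POLICIES' in line_stripped.upper() and not in_policies:
--             in_policies = True
--
--         if in_policies:
--             result_lines.append(line)
--
--         # Stop at REQUIREMENTS – ACADEMIC (start of next major section)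
--         if in_policies and ('REQUIREMENTS' in line_stripped.upper() and
--                            ('ACADEMIC' in line_stripped.upper() or
--                             'SKILLS' in line_stripped.upper() or
--                             'EXAM' in line_stripped.upper())):
--             break
--
--     return '\n'.join(result_lines)
-- ===== SOURCE B (Python) =====
-- def extract_policies_section(text):
--     """Extract the POLICIES section from a course page."""
--     lines = text.split('\n')
--     uppers = [l.strip().upper() for l in lines]
--     starts = [i for i, u in enumerate(uppers) if 'POLICIES' in u]
--     stops = [i for i, u in enumerate(uppers)
--              if 'REQUIREMENTS' in u and ('ACADEMIC' in u or 'SKILLS' in u or 'EXAM' in u)]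
--     if not starts:
--         return ''
--     s = starts[0]
--     e = next((j for j in stops if j >= s), len(lines) - 1)
--     return '\n'.join(lines[s:e + 1])
-- ===== Notes on version B (the rewrite author's own statement) =====
-- stated objective: alternative
-- what changed: Replaced A's stateful flag-and-accumulator loop with early break by a declarative index-table formulation: precompute the normalized lines and the full lists of start-marker and stop-marker indices via comprehensions, then pick the section bounds by index arithmetic (first start, first stop at or after it) and slice-and-join.
import Mathlib
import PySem

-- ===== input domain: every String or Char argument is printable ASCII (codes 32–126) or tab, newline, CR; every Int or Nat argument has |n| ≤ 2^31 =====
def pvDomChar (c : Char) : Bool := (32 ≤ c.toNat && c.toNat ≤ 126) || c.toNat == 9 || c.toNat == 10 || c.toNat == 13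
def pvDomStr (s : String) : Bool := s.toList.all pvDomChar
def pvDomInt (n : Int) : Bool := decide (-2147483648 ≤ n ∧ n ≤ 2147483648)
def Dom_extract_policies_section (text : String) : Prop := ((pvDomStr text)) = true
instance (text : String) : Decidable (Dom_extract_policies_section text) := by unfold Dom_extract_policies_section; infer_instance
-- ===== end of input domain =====

-- B replaces A's flag-and-accumulator loop by a declarative index-table formulation
-- (precomputed marker-index lists, then index arithmetic and one slice); objective: alternative, same cost.

-- text.split('\n'); sep ≠ "" so split? is always some
def pvSplitLines (text : String) : List String := (PySem.Str.split? text "\n").getD []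

-- ===== PORT A =====
-- the for-loop of A: state = (result_lines, in_policies); early `break` = returning res'
def pvLoopA : List String → List String → Bool → List String
  | [], res, _ => res
  | l :: rest, res, inp =>
    let u := PySem.Str.upper (PySem.Str.strip l)
    let inp' := if PySem.Str.isIn "POLICIES" u && !inp then true else inp
    let res' := if inp' then res ++ [l] else res
    if inp' && (PySem.Str.isIn "REQUIREMENTS" u &&
        (PySem.Str.isIn "ACADEMIC" u || PySem.Str.isIn "SKILLS" u || PySem.Str.isIn "EXAM" u)) then
      res'
    else
      pvLoopA rest res' inp'

def extract_policies_section (text : String) : String :=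
  PySem.Str.join "\n" (pvLoopA (pvSplitLines text) [] false)

-- ===== PORT B =====
-- uppers = [l.strip().upper() for l in lines]
def pvUppers (lines : List String) : List String :=
  lines.map (fun l => PySem.Str.upper (PySem.Str.strip l))

-- starts = [i for i, u in enumerate(uppers) if 'POLICIES' in u]
def pvStartsIdx (us : List String) : List Int :=
  (PySem.List.enumerate us 0).filterMap
    (fun p => if PySem.Str.isIn "POLICIES" p.2 then some p.1 else none)

-- stops = [i for i, u in enumerate(uppers) if 'REQUIREMENTS' in u and (…)]
def pvStopsIdx (us : List String) : List Int :=
  (PySem.List.enumerate us 0).filterMap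
    (fun p => if PySem.Str.isIn "REQUIREMENTS" p.2 &&
        (PySem.Str.isIn "ACADEMIC" p.2 || PySem.Str.isIn "SKILLS" p.2 || PySem.Str.isIn "EXAM" p.2)
      then some p.1 else none)

def extract_policies_section_alt (text : String) : String :=
  -- 'if not starts: return ""' / 's = starts[0]' / 'e = next((j for j in stops if j >= s), len(lines)-1)' / join(lines[s:e+1])
  match (pvStartsIdx (pvUppers (pvSplitLines text))).head? with
  | none => ""
  | some s =>
    PySem.Str.join "\n" (PySem.List.slice (pvSplitLines text) (some s)
      (some ((((pvStopsIdx (pvUppers (pvSplitLines text))).find? (fun j => s ≤ j)).getD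
        (((pvSplitLines text).length : Int) - 1)) + 1)))

-- ===== PRECONDITION & SPEC =====
def Spec_extract_policies_section (text : String) (out : String) : Prop := out = extract_policies_section_alt text
instance (text : String) (out : String) : Decidable (Spec_extract_policies_section text out) := by unfold Spec_extract_policies_section; infer_instance

-- ===== CLAIM (what is proved, stated in full; the proofs are below) =====
def Claim_equal_extract_policies_section : Prop := ∀ (text : String), Dom_extract_policies_section text → Spec_extract_policies_section text (extract_policies_section text)

-- ===== LEMMAS AND PROOFS =====

def pvIsStart (l : String) : Bool := PySem.Str.isIn "POLICIES" (PySem.Str.upper (PySem.Str.strip l))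

def pvIsStop (l : String) : Bool :=
  let u := PySem.Str.upper (PySem.Str.strip l)
  PySem.Str.isIn "REQUIREMENTS" u &&
    (PySem.Str.isIn "ACADEMIC" u || PySem.Str.isIn "SKILLS" u || PySem.Str.isIn "EXAM" u)

-- index of the first start / stop line
def pvFindStart : List String → Option Nat
  | [] => none
  | l :: r => if pvIsStart l then some 0 else (pvFindStart r).map (· + 1)

def pvFindStop : List String → Option Nat
  | [] => none
  | l :: r => if pvIsStop l then some 0 else (pvFindStop r).map (· + 1)

-- one step of A's loop, phrased with the predicates (definitional)
theorem pvLoopA_cons (l : String) (r res : List String) (inp : Bool) :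
    pvLoopA (l :: r) res inp =
      (let inp' := if pvIsStart l && !inp then true else inp
       let res' := if inp' then res ++ [l] else res
       if inp' && pvIsStop l then res' else pvLoopA r res' inp') := rfl

-- what A collects once in_policies is true: lines up to and including the first stop line
def pvCollect : List String → List String
  | [] => []
  | l :: r => l :: (if pvIsStop l then [] else pvCollect r)

theorem pvLoopA_true (ls : List String) : ∀ res, pvLoopA ls res true = res ++ pvCollect ls := by
  induction ls with
  | nil => intro res; simp [pvLoopA, pvCollect]
  | cons l r ih =>
      intro res
      rw [pvLoopA_cons]
      simp only [Bool.not_true, Bool.and_false, Bool.false_eq_true, if_false, if_true,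
        Bool.true_and, pvCollect]
      by_cases h : pvIsStop l = true
      · simp only [h, if_true]
      · simp only [h, Bool.false_eq_true, if_false, ih, List.append_assoc, List.singleton_append]

theorem pvLoopA_false_none (ls : List String) (h : pvFindStart ls = none) :
    ∀ res, pvLoopA ls res false = res := by
  induction ls with
  | nil => intro res; simp [pvLoopA]
  | cons l r ih =>
      intro res
      simp only [pvFindStart] at h
      by_cases hs : pvIsStart l = true
      · simp [hs] at h
      · simp only [hs, Bool.false_eq_true, if_false, Option.map_eq_none_iff] at h
        rw [pvLoopA_cons]
        simp only [hs, Bool.false_and, Bool.false_eq_true, if_false, Bool.not_false]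
        exact ih h res

theorem pvLoopA_false_some (ls : List String) : ∀ s res, pvFindStart ls = some s →
    pvLoopA ls res false = res ++ pvCollect (ls.drop s) := by
  induction ls with
  | nil => intro s res h; simp [pvFindStart] at h
  | cons l r ih =>
      intro s res h
      simp only [pvFindStart] at h
      by_cases hs : pvIsStart l = true
      · simp only [hs, if_true, Option.some.injEq] at h
        subst h
        rw [List.drop_zero, pvLoopA_cons]
        simp only [hs, Bool.not_false, Bool.and_true, if_true, Bool.true_and, pvCollect]
        by_cases hstop : pvIsStop l = true
        · simp only [hstop, if_true]
        · simp only [hstop, Bool.false_eq_true, if_false, pvLoopA_true,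
            List.append_assoc, List.singleton_append]
      · simp only [hs, Bool.false_eq_true, if_false] at h
        obtain ⟨t, ht, rfl⟩ := Option.map_eq_some_iff.mp h
        rw [pvLoopA_cons]
        simp only [hs, Bool.false_and, Bool.false_eq_true, if_false, Bool.not_false]
        simpa using ih t res ht

theorem pvCollect_eq_take (ls : List String) :
    pvCollect ls = ls.take (((pvFindStop ls).getD (ls.length - 1)) + 1) := by
  induction ls with
  | nil => simp [pvCollect]
  | cons l r ih =>
      simp only [pvCollect, pvFindStop]
      by_cases h : pvIsStop l = true
      · simp [h]
      · simp only [h, Bool.false_eq_true, if_false]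
        cases hf : pvFindStop r with
        | none =>
            simp only [hf, Option.map_none, Option.getD_none] at ih ⊢
            simp only [List.length_cons, Nat.add_sub_cancel, List.take_succ_cons]
            rw [ih]
            congr 1
            cases r with
            | nil => simp
            | cons a b => simp
        | some t =>
            simp only [hf, Option.map_some, Option.getD_some] at ih ⊢
            simp [List.take_succ_cons, ih]

theorem pvFindStart_lt (ls : List String) : ∀ s, pvFindStart ls = some s → s < ls.length := by
  induction ls with
  | nil => intro s h; simp [pvFindStart] at h
  | cons l r ih =>
      intro s h
      simp only [pvFindStart] at h
      by_cases hs : pvIsStart l = true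
      · simp only [hs, if_true, Option.some.injEq] at h
        subst h; simp
      · simp only [hs, Bool.false_eq_true, if_false] at h
        obtain ⟨t, ht, rfl⟩ := Option.map_eq_some_iff.mp h
        have := ih t ht
        simp only [List.length_cons]; omega

theorem find?_congr_mem {α : Type} (l : List α) (p q : α → Bool)
    (h : ∀ x ∈ l, p x = q x) : l.find? p = l.find? q := by
  induction l with
  | nil => rfl
  | cons a r ih =>
      simp only [List.find?_cons]
      rw [h a (List.mem_cons_self ..)]
      cases q a
      · exact ih (fun x hx => h x (List.mem_cons_of_mem _ hx))
      · rfl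

-- B's comprehension predicates over the normalized line (proof-side only)
def pvIsStartU (u : String) : Bool := PySem.Str.isIn "POLICIES" u

def pvIsStopU (u : String) : Bool :=
  PySem.Str.isIn "REQUIREMENTS" u &&
    (PySem.Str.isIn "ACADEMIC" u || PySem.Str.isIn "SKILLS" u || PySem.Str.isIn "EXAM" u)

-- generic index-collector: the indices (from offset k) of the lines satisfying p
def pvIdxOf (p : String → Bool) : List String → Int → List Int
  | [], _ => []
  | l :: r, k => if p l then k :: pvIdxOf p r (k + 1) else pvIdxOf p r (k + 1)

-- generic first-index finder (pvFindStart/pvFindStop are its instances)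
def pvFirstIdx (p : String → Bool) : List String → Option Nat
  | [] => none
  | l :: r => if p l then some 0 else (pvFirstIdx p r).map (· + 1)

theorem pvFindStart_eq (ls : List String) : pvFindStart ls = pvFirstIdx pvIsStart ls := by
  induction ls with
  | nil => rfl
  | cons l r ih =>
      simp only [pvFindStart, pvFirstIdx, ih]

theorem pvFindStop_eq (ls : List String) : pvFindStop ls = pvFirstIdx pvIsStop ls := by
  induction ls with
  | nil => rfl
  | cons l r ih =>
      simp only [pvFindStop, pvFirstIdx, ih]

-- an enumerate-filterMap comprehension is the index-collector (abstract predicate: no string reasoning)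
theorem pvFilterMap_enumerate_eq (p : String → Bool) : ∀ (us : List String) (k : Int),
    (PySem.List.enumerate us k).filterMap (fun q => if p q.2 then some q.1 else none)
      = pvIdxOf p us k := by
  intro us
  induction us with
  | nil => intro k; simp [PySem.List.enumerate_nil, pvIdxOf]
  | cons u r ih =>
      intro k
      simp only [PySem.List.enumerate_cons, List.filterMap_cons, pvIdxOf]
      cases h : p u with
      | true => simp only [if_true, ih]
      | false => simp only [Bool.false_eq_true, if_false, ih]

-- the collector over a mapped list = the collector of the composed predicate
theorem pvIdxOf_map (p : String → Bool) (g : String → String) : ∀ (ls : List String) (k : Int),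
    pvIdxOf p (ls.map g) k = pvIdxOf (fun l => p (g l)) ls k := by
  intro ls
  induction ls with
  | nil => intro k; rfl
  | cons l r ih =>
      intro k
      simp only [List.map_cons, pvIdxOf, ih]

theorem pvIdxOf_ge (p : String → Bool) : ∀ (ls : List String) (k j : Int),
    j ∈ pvIdxOf p ls k → k ≤ j := by
  intro ls
  induction ls with
  | nil => intro k j hj; simp [pvIdxOf] at hj
  | cons l r ih =>
      intro k j hj
      simp only [pvIdxOf] at hj
      by_cases h : p l = true
      · rw [if_pos h] at hj
        rcases List.mem_cons.mp hj with rfl | hj'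
        · exact le_rfl
        · have := ih (k + 1) j hj'; omega
      · rw [if_neg h] at hj
        have := ih (k + 1) j hj; omega

theorem pvIdxOf_head (p : String → Bool) (ls : List String) : ∀ (k : Int),
    (pvIdxOf p ls k).head? = (pvFirstIdx p ls).map (fun (n : Nat) => k + (n : Int)) := by
  induction ls with
  | nil => intro k; simp [pvIdxOf, pvFirstIdx]
  | cons l r ih =>
      intro k
      simp only [pvIdxOf, pvFirstIdx]
      cases h : p l with
      | true => simp
      | false =>
          simp only [Bool.false_eq_true, if_false, ih (k + 1)]
          cases pvFirstIdx p r with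
          | none => simp
          | some t =>
              simp only [Option.map_some]
              refine congrArg some ?_
              push_cast; omega

theorem pvIdxOf_find (p : String → Bool) (ls : List String) : ∀ (k : Int) (s : Nat),
    (pvIdxOf p ls k).find? (fun j => decide (k + (s : Int) ≤ j))
      = (pvFirstIdx p (ls.drop s)).map (fun (t : Nat) => k + (s : Int) + (t : Int)) := by
  induction ls with
  | nil => intro k s; simp [pvIdxOf, pvFirstIdx]
  | cons l r ih =>
      intro k s
      simp only [pvIdxOf]
      cases h : p l with
      | true =>
          simp only [if_true]
          cases s with
          | zero =>
              simp only [List.find?_cons, Nat.cast_zero, add_zero, le_refl, decide_true,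
                List.drop_zero, pvFirstIdx, h, if_true, Option.map_some]
          | succ t =>
              simp only [List.find?_cons]
              have hpred : decide (k + ((t + 1 : Nat) : Int) ≤ k) = false := by
                simp only [decide_eq_false_iff_not]; push_cast; omega
              rw [hpred]
              have harith : (fun j => decide (k + ((t + 1 : Nat) : Int) ≤ j))
                  = (fun j => decide ((k + 1) + ((t : Nat) : Int) ≤ j)) := by
                funext j
                simp only [decide_eq_decide]
                push_cast
                omega
              rw [harith, ih (k + 1) t, List.drop_succ_cons]
              cases pvFirstIdx p (r.drop t) with
              | none => simp
              | some m =>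
                  simp only [Option.map_some]
                  refine congrArg some ?_
                  push_cast; omega
      | false =>
          simp only [Bool.false_eq_true, if_false]
          cases s with
          | zero =>
              rw [find?_congr_mem _ (fun j => decide (k + ((0 : Nat) : Int) ≤ j))
                  (fun j => decide ((k + 1) + ((0 : Nat) : Int) ≤ j))
                  (by
                    intro j hj
                    have := pvIdxOf_ge p r (k + 1) j hj
                    simp only [Nat.cast_zero, add_zero, decide_eq_decide]
                    omega)]
              rw [ih (k + 1) 0]
              simp only [List.drop_zero, pvFirstIdx, h, Bool.false_eq_true, if_false]
              cases pvFirstIdx p r with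
              | none => simp
              | some m =>
                  simp only [Option.map_some]
                  refine congrArg some ?_
                  push_cast; omega
          | succ t =>
              have harith : (fun j => decide (k + ((t + 1 : Nat) : Int) ≤ j))
                  = (fun j => decide ((k + 1) + ((t : Nat) : Int) ≤ j)) := by
                funext j
                simp only [decide_eq_decide]
                push_cast
                omega
              rw [harith, ih (k + 1) t, List.drop_succ_cons]
              cases pvFirstIdx p (r.drop t) with
              | none => simp
              | some m =>
                  simp only [Option.map_some]
                  refine congrArg some ?_
                  push_cast; omega

-- B's comprehensions, rewritten as index-collectors over the raw lines
theorem pvStartsIdx_eq (ls : List String) :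
    pvStartsIdx (pvUppers ls) = pvIdxOf pvIsStart ls 0 := by
  unfold pvStartsIdx
  rw [show (fun p : Int × String => if PySem.Str.isIn "POLICIES" p.2 then some p.1 else none)
      = (fun q : Int × String => if pvIsStartU q.2 then some q.1 else none) from rfl]
  rw [pvFilterMap_enumerate_eq]
  unfold pvUppers
  rw [pvIdxOf_map]
  rfl

theorem pvStopsIdx_eq (ls : List String) :
    pvStopsIdx (pvUppers ls) = pvIdxOf pvIsStop ls 0 := by
  unfold pvStopsIdx
  rw [show (fun p : Int × String => if PySem.Str.isIn "REQUIREMENTS" p.2 &&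
        (PySem.Str.isIn "ACADEMIC" p.2 || PySem.Str.isIn "SKILLS" p.2 || PySem.Str.isIn "EXAM" p.2)
        then some p.1 else none)
      = (fun q : Int × String => if pvIsStopU q.2 then some q.1 else none) from rfl]
  rw [pvFilterMap_enumerate_eq]
  unfold pvUppers
  rw [pvIdxOf_map]
  rfl

-- ===== VERDICT (by name: the statement is the Claim_ definition above) =====
theorem extract_policies_section_spec : Claim_equal_extract_policies_section := by
  intro text _
  unfold Spec_extract_policies_section extract_policies_section extract_policies_section_alt
  rw [pvStartsIdx_eq, pvStopsIdx_eq, pvIdxOf_head, ← pvFindStart_eq]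
  cases h : pvFindStart (pvSplitLines text) with
  | none =>
      rw [pvLoopA_false_none _ h]
      simp only [Option.map_none]
      rfl
  | some s =>
      rw [pvLoopA_false_some _ s [] h]
      simp only [Option.map_some, List.nil_append]
      rw [show (fun j : Int => decide ((0 : Int) + (s : Int) ≤ j))
          = (fun j : Int => decide ((0 : Int) + ((s : Nat) : Int) ≤ j)) from rfl]
      rw [pvIdxOf_find pvIsStop (pvSplitLines text) 0 s, ← pvFindStop_eq]
      have hs := pvFindStart_lt (pvSplitLines text) s h
      rw [pvCollect_eq_take]
      cases hf : pvFindStop ((pvSplitLines text).drop s) with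
      | none =>
          simp only [Option.map_none, Option.getD_none, List.length_drop]
          rw [show (((pvSplitLines text).length : Int) - 1 + 1)
              = (((pvSplitLines text).length : Nat) : Int) by omega]
          rw [show ((0 : Int) + (s : Int)) = ((s : Nat) : Int) by omega]
          rw [PySem.List.slice_natCast]
          congr 2
          omega
      | some t =>
          simp only [Option.map_some, Option.getD_some]
          rw [show ((0 : Int) + (s : Int) + (t : Int) + 1) = (((s + t + 1 : Nat) : Int)) by push_cast; omega]
          rw [show ((0 : Int) + (s : Int)) = ((s : Nat) : Int) by omega]
          rw [PySem.List.slice_natCast]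
          congr 2
          omega
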